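/- GENERATED by farm/mkstatement.py from design/units.tsv (unit `start_decoder.2a`) and the assertions of Vorbis/Spec/StartDecoder2.lean — do not edit.
   THE STATEMENT of the proof unit `start_decoder.2a`: segment 2a of `start_decoder` (5 instructions; entries 0x113a2b;
   exits 0x113a46; ranges 0x113a2b-0x113a41)
   takes each of its entry assertions to one of its exit assertions (`Vorbis.Spec.StartDecoder.Seg2a`), given the contracts of its callees.
   What the names mean: Vorbis/Spec/Basic.lean (the shared hypotheses), Vorbis/Spec/StartDecoder2.lean (the assertions). The theorem to prove:
   `theorem start_decoder_2a_ok : Vorbis.Spec.start_decoder_2a.Statement`. -/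
import Vorbis.Spec.Reader
import Vorbis.Spec.StartDecoder2
namespace Vorbis.Spec.start_decoder_2a
open X86 X86.User Asan

/-- The statement of unit `start_decoder.2a`. -/
def Statement : Prop :=
  ∀ (Lay : Layout) (_hLay : Lay.hi = 0x1000000) (μ : Microarch) (_hμ : UserX.MicroOK μ) (u₀ : State)
    (_hcode : HasCodeNat Lay u₀ Vorbis.L.start_decoder.entry Vorbis.Code.code_start_decoder.nat Vorbis.L.start_decoder.size)
    (_h_asan_store1_noabort : Asan.SmallCheck Lay μ Vorbis.WayInv (Vorbis.CodeOK u₀) [.rax, .rdx] 1 Vorbis.L.__asan_store1_noabort.entry)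
    (_h_start_page : ∀ (others : List Obj) (frames : List (Nat × FrameLayout)) (Blk : Block → Prop) (len : Nat), Calls Lay μ Vorbis.WayInv (Vorbis.conv u₀) Vorbis.L.start_page.entry (Vorbis.Spec.start_page.spec others frames Blk len)),
    Vorbis.Spec.StartDecoder.Seg2a Lay μ u₀

end Vorbis.Spec.start_decoder_2a
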